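-- pv_equiv track=rewrite | github.com/uhuu9ijfreuhjdjjHU/dot-files | Maple-font/source/py/freeze.py | patch_config
-- ===== SOURCE A (Python) =====
-- def is_enable(v):
--     return v.upper().startswith("ENABLE")
--
-- def is_disable(v):
--     return v.upper().startswith("DISABLE")
--
-- def is_ignore(v):
--     return v.upper().startswith("IGNORE")
--
-- def patch_config(config: dict, calt: bool):
--     result = {}
--     invalid_items = []
--     for k, v in config.items():
--         if is_enable(v):
--             result[k] = "1"
--         elif is_disable(v):
--             result[k] = "-1"
--         elif not is_ignore(v):
--             invalid_items.append((k, v))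
--         else:
--             result[k] = "0"
--
--     if len(invalid_items) > 0:
--         report = ", ".join([f"{k}: {v}" for k, v in invalid_items])
--         raise TypeError(f"Invalid freeze config item: {{ {report} }}")
--
--     result["calt"] = "1" if calt else "0"
--
--     return result
-- ===== SOURCE B (Python) =====
-- def is_enable(v):
--     return v.upper().startswith("ENABLE")
--
-- def is_disable(v):
--     return v.upper().startswith("DISABLE")
--
-- def is_ignore(v):
--     return v.upper().startswith("IGNORE")
--
-- def patch_config(config: dict, calt: bool):
--     # validation pass: collect every item that is neither enable/disable/ignore
--     invalid_items = [(k, v) for k, v in config.items()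
--                      if not (is_enable(v) or is_disable(v) or is_ignore(v))]
--     if invalid_items:
--         report = ", ".join([f"{k}: {v}" for k, v in invalid_items])
--         raise TypeError(f"Invalid freeze config item: {{ {report} }}")
--     # transformation pass: every remaining value maps to a flag
--     result = {k: ("1" if is_enable(v) else "-1" if is_disable(v) else "0")
--               for k, v in config.items()}
--     result["calt"] = "1" if calt else "0"
--     return result
-- ===== Notes on version B (the rewrite author's own statement) =====
-- stated objective: simpler
-- what changed: Splits A's single interleaved loop (which builds the result and collects invalid items simultaneously) into a validation comprehension followed by a dict-comprehension transformation pass.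
import Mathlib
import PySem

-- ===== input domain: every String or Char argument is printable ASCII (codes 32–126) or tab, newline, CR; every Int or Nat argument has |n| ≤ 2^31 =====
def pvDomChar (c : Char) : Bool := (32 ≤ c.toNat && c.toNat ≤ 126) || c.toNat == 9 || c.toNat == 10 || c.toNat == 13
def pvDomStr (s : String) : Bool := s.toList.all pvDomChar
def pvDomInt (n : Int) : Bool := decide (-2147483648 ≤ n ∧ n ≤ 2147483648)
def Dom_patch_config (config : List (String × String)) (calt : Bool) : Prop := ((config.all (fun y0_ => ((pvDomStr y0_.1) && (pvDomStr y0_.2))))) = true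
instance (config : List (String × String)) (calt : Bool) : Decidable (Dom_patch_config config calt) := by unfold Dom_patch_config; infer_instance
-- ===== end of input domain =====

-- B splits A's single interleaved loop into a validation pass followed by a transformation pass (objective: simpler); on invalid items both raise the same TypeError (outside Pre_).

-- ===== PORT A =====
def is_enable (v : String) : Bool := PySem.Str.startswith (PySem.Str.upper v) "ENABLE"
def is_disable (v : String) : Bool := PySem.Str.startswith (PySem.Str.upper v) "DISABLE"
def is_ignore (v : String) : Bool := PySem.Str.startswith (PySem.Str.upper v) "IGNORE"

-- literal port of A's loop: one fold carrying (result dict, invalid list); the raise branch returns []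
def patch_config (config : List (String × String)) (calt : Bool) : List (String × String) :=
  let st := config.foldl
    (fun (st : PySem.Dict String String × List (String × String)) kv =>
      if is_enable kv.2 then (st.1.insert kv.1 "1", st.2)
      else if is_disable kv.2 then (st.1.insert kv.1 "-1", st.2)
      else if !(is_ignore kv.2) then (st.1, st.2 ++ [(kv.1, kv.2)])
      else (st.1.insert kv.1 "0", st.2))
    (PySem.Dict.empty, [])
  if st.2.length > 0 then []  -- Python raises TypeError here (excluded by Pre_)
  else (st.1.insert "calt" (if calt then "1" else "0")).items

-- ===== PORT B =====
def pc_valid (v : String) : Bool := is_enable v || is_disable v || is_ignore v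
def pc_flag (v : String) : String := if is_enable v then "1" else if is_disable v then "-1" else "0"

-- port of Source B: validation filter, then a dict-comprehension fold, then set calt
def patch_config_alt (config : List (String × String)) (calt : Bool) : List (String × String) :=
  let invalid_items := config.filter (fun kv => !(pc_valid kv.2))
  if invalid_items ≠ [] then []  -- Python raises TypeError here (excluded by Pre_)
  else
    let result := config.foldl (fun (d : PySem.Dict String String) kv => d.insert kv.1 (pc_flag kv.2)) PySem.Dict.empty
    (result.insert "calt" (if calt then "1" else "0")).items

-- ===== PRECONDITION & SPEC =====
-- Pre_ excludes exactly the configs on which Python A raises TypeError: some value starts with none of ENABLE/DISABLE/IGNORE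
def Pre_patch_config (config : List (String × String)) (calt : Bool) : Prop :=
  ∀ kv ∈ config, pc_valid kv.2 = true
instance (config : List (String × String)) (calt : Bool) : Decidable (Pre_patch_config config calt) := by unfold Pre_patch_config; infer_instance

def pvWitness_patch_config : (List (String × String)) × Bool :=
  ([("cv01", "enable"), ("ss02", "Disable"), ("zero", "IGNORE")], true)

def Spec_patch_config (config : List (String × String)) (calt : Bool) (out : List (String × String)) : Prop := out = patch_config_alt config calt
instance (config : List (String × String)) (calt : Bool) (out : List (String × String)) : Decidable (Spec_patch_config config calt out) := by unfold Spec_patch_config; infer_instance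

-- ===== CLAIM (what is proved, stated in full; the proofs are below) =====
def Claim_equal_patch_config : Prop := ∀ (config : List (String × String)) (calt : Bool), Dom_patch_config config calt → Pre_patch_config config calt → Spec_patch_config config calt (patch_config config calt)

-- ===== LEMMAS AND PROOFS =====

-- under Pre_, A's fold keeps the invalid list empty and its dict equals B's fold
lemma pc_fold_eq (config : List (String × String)) (d : PySem.Dict String String)
    (h : ∀ kv ∈ config, pc_valid kv.2 = true) :
    config.foldl
      (fun (st : PySem.Dict String String × List (String × String)) kv =>
        if is_enable kv.2 then (st.1.insert kv.1 "1", st.2)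
        else if is_disable kv.2 then (st.1.insert kv.1 "-1", st.2)
        else if !(is_ignore kv.2) then (st.1, st.2 ++ [(kv.1, kv.2)])
        else (st.1.insert kv.1 "0", st.2))
      (d, [])
    = (config.foldl (fun (d : PySem.Dict String String) kv => d.insert kv.1 (pc_flag kv.2)) d, []) := by
  induction config generalizing d with
  | nil => rfl
  | cons kv rest ih =>
    have hkv : pc_valid kv.2 = true := h kv (List.mem_cons_self)
    have hrest : ∀ p ∈ rest, pc_valid p.2 = true := fun p hp => h p (List.mem_cons_of_mem _ hp)
    simp only [List.foldl_cons]
    have hstep :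
        (if is_enable kv.2 then ((d.insert kv.1 "1" : PySem.Dict String String), ([] : List (String × String)))
         else if is_disable kv.2 then (d.insert kv.1 "-1", [])
         else if !(is_ignore kv.2) then (d, [] ++ [(kv.1, kv.2)])
         else (d.insert kv.1 "0", []))
        = (d.insert kv.1 (pc_flag kv.2), ([] : List (String × String))) := by
      unfold pc_valid at hkv
      unfold pc_flag
      by_cases he : is_enable kv.2
      · simp [he]
      · by_cases hd : is_disable kv.2
        · simp [he, hd]
        · have hi : is_ignore kv.2 = true := by simp [he, hd] at hkv; exact hkv
          simp [he, hd, hi]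
    rw [hstep]
    exact ih _ hrest

-- ===== VERDICT (by name: the statement is the Claim_ definition above) =====
theorem patch_config_spec : Claim_equal_patch_config := by
  intro config calt _ hpre
  show patch_config config calt = patch_config_alt config calt
  unfold patch_config patch_config_alt
  have hfilter : config.filter (fun kv => !(pc_valid kv.2)) = [] := by
    simp only [List.filter_eq_nil_iff]
    intro kv hkv
    simp [hpre kv hkv]
  rw [pc_fold_eq config PySem.Dict.empty hpre]
  simp [hfilter]
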